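-- pv_equiv track=rewrite | github.com/pypoulp/types-oiio-python | generate_stubs.py | fix_overload_conflicts
-- ===== SOURCE A (Python) =====
-- def fix_overload_conflicts(content: str) -> str:
--     """
--     Fix overlapping overload issues in generated stubs.
--
--     Common issues:
--     1. int is a subtype of float, so separate overloads conflict
--     2. Union types that already include subtypes make separate overloads redundant
--
--     Solution: Remove redundant overloads.
--     """
--     lines = content.split("\n")
--     fixed_lines = []
--     skip_next = False
--
--     for i in range(len(lines)):
--         if skip_next:
--             skip_next = False
--             continue
--
--         line = lines[i]
--
--         # Check for problematic overload patterns
--         if i + 1 < len(lines) and "@overload" in line: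
--             next_line = lines[i + 1]
--
--             # Pattern 1: int overload when float exists
--             if "arg1: int" in next_line and any(
--                 [
--                     "def attribute(" in next_line,
--                     "def __init__(" in next_line and "arg1: int" in next_line,
--                 ]
--             ):
--                 # Look ahead to see if there's a float version
--                 has_float_version = False
--                 for j in range(max(0, i - 4), min(len(lines), i + 6)):
--                     if j != i + 1 and "arg1: float" in lines[j]:
--                         has_float_version = True
--                         break
--
--                 if has_float_version:
--                     skip_next = True
--                     continue
--
--             # Pattern 2: TypeDesc class __init__ with redundant overloads
--             # Skip standalone BASETYPE and str overloads when Union exists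
--             if (
--                 "def __init__(self, arg0: BASETYPE, /)" in next_line
--                 or "def __init__(self, arg0: str, /)" in next_line
--             ):
--                 # Check if there's a union type that includes this nearby
--                 for j in range(max(0, i - 10), min(len(lines), i + 10)):
--                     if j != i + 1 and "arg0: TypeDesc | BASETYPE | str" in lines[j]:
--                         skip_next = True
--                         break
--
--                 if skip_next:
--                     continue
--
--         fixed_lines.append(line)
--
--     return "\n".join(fixed_lines)
-- ===== SOURCE B (Python) =====
-- def fix_overload_conflicts(content: str) -> str:
--     """
--     Fix overlapping overload issues in generated stubs.
--
--     Prefix-sum reformulation: per-line feature flags and their running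
--     counts are precomputed once, so each lookahead-window test becomes two
--     table lookups plus an exclusion of line i+1, instead of scanning the
--     window; a pairwise-consuming loop then emits the kept lines directly.
--     """
--     lines = content.split("\n")
--     n = len(lines)
--     is_float = ["arg1: float" in ln for ln in lines]
--     is_union = ["arg0: TypeDesc | BASETYPE | str" in ln for ln in lines]
--     pf = [0]
--     for b in is_float:
--         pf.append(pf[-1] + b)
--     pu = [0]
--     for b in is_union:
--         pu.append(pu[-1] + b)
--
--     def removable(i):
--         # is lines[i] an @overload decorator whose signature line i+1 is redundant?
--         if i + 1 >= n or "@overload" not in lines[i]: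
--             return False
--         nxt = lines[i + 1]
--         if "arg1: int" in nxt and ("def attribute(" in nxt or "def __init__(" in nxt):
--             lo, hi = max(0, i - 4), min(n, i + 6)
--             # line i+1 always lies in the window, so subtract its own flag
--             if pf[hi] - pf[lo] - is_float[i + 1] > 0:
--                 return True
--         if ("def __init__(self, arg0: BASETYPE, /)" in nxt
--                 or "def __init__(self, arg0: str, /)" in nxt):
--             lo, hi = max(0, i - 10), min(n, i + 10)
--             return pu[hi] - pu[lo] - is_union[i + 1] > 0
--         return False
--
--     out = []
--     i = 0
--     while i < n:
--         if removable(i):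
--             i += 2
--         else:
--             out.append(lines[i])
--             i += 1
--     return "\n".join(out)
-- ===== Notes on version B (the rewrite author's own statement) =====
-- stated objective: alternative
-- what changed: Replaces A's per-overload lookahead window scans by precomputed per-line feature flags with prefix-sum count tables (each window test becomes two table lookups minus the flag of line i+1), and replaces the skip_next flag by a pairwise-consuming loop that advances by 2 when a redundant pair is found.
import Mathlib
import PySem

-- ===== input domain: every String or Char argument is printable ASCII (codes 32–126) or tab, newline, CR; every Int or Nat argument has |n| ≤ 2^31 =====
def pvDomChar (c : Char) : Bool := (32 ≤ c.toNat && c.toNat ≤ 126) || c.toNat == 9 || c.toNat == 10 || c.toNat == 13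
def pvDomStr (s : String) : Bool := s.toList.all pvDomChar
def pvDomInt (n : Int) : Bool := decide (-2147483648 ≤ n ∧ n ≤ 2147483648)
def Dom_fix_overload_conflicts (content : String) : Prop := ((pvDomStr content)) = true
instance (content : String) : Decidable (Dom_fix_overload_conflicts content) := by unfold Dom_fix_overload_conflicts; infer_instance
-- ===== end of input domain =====

-- B replaces A's per-@overload lookahead window scans by precomputed per-line flags with
-- prefix-sum count tables, and the skip_next flag by a loop consuming 2 lines per removal.

-- ===== PORT A =====
-- A's for-loop over range(len(lines)) with the skip_next flag, as a recursion over the index list with state (fixed_lines, skip_next).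
def fixA_go (lines : List String) : List Nat → List String → Bool → List String
  | [], acc, _ => acc
  | i :: rest, acc, skip =>
    if skip then fixA_go lines rest acc false
    else
      let line := lines.getD i ""
      if decide (i + 1 < lines.length) && PySem.Str.isIn "@overload" line then
        let next := lines.getD (i + 1) ""
        let c1 := PySem.Str.isIn "arg1: int" next &&
          (PySem.Str.isIn "def attribute(" next ||
           (PySem.Str.isIn "def __init__(" next && PySem.Str.isIn "arg1: int" next))
        let hasFloat := (List.range' (i - 4) (min lines.length (i + 6) - (i - 4))).any
          (fun j => decide (j ≠ i + 1) && PySem.Str.isIn "arg1: float" (lines.getD j ""))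
        let c2 := PySem.Str.isIn "def __init__(self, arg0: BASETYPE, /)" next ||
                  PySem.Str.isIn "def __init__(self, arg0: str, /)" next
        let hasUnion := (List.range' (i - 10) (min lines.length (i + 10) - (i - 10))).any
          (fun j => decide (j ≠ i + 1) && PySem.Str.isIn "arg0: TypeDesc | BASETYPE | str" (lines.getD j ""))
        if c1 && hasFloat then fixA_go lines rest acc true
        else if c2 && hasUnion then fixA_go lines rest acc true
        else fixA_go lines rest (acc ++ [line]) false
      else fixA_go lines rest (acc ++ [line]) false

def fix_overload_conflicts (content : String) : String :=
  let lines := (PySem.Str.split? content "\n").getD []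
  PySem.Str.join "\n" (fixA_go lines (List.range lines.length) [] false)

-- ===== PORT B =====
-- Source B's per-line feature flags (the two list comprehensions).
def fixB_flags (lines : List String) (pat : String) : List Bool :=
  lines.map (fun ln => PySem.Str.isIn pat ln)

-- Source B's prefix-sum build: pf = [0]; for b in flags: pf.append(pf[-1] + b)
def fixB_prefix (flags : List Bool) : List Nat :=
  flags.foldl (fun acc b => acc ++ [(acc.getLast?.getD 0) + (if b then 1 else 0)]) [0]

-- Source B's removable(i): window tests via two prefix-table lookups minus the flag of line i+1.
def removableB (lines : List String) (isF isU : List Bool) (pf pu : List Nat) (i : Nat) : Bool :=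
  if decide (i + 1 < lines.length) && PySem.Str.isIn "@overload" (lines.getD i "") then
    let nxt := lines.getD (i + 1) ""
    if (PySem.Str.isIn "arg1: int" nxt &&
        (PySem.Str.isIn "def attribute(" nxt || PySem.Str.isIn "def __init__(" nxt)) &&
       decide (0 < pf.getD (min lines.length (i + 6)) 0 - pf.getD (i - 4) 0 -
                   (if isF.getD (i + 1) false then 1 else 0)) then
      true
    else
      (PySem.Str.isIn "def __init__(self, arg0: BASETYPE, /)" nxt ||
       PySem.Str.isIn "def __init__(self, arg0: str, /)" nxt) &&
      decide (0 < pu.getD (min lines.length (i + 10)) 0 - pu.getD (i - 10) 0 -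
                  (if isU.getD (i + 1) false then 1 else 0))
  else false

-- Source B's while loop: consume 2 lines on a removable pair, else emit the line.
def fixB_go (lines : List String) (isF isU : List Bool) (pf pu : List Nat)
    (i : Nat) (out : List String) : List String :=
  if i < lines.length then
    if removableB lines isF isU pf pu i then fixB_go lines isF isU pf pu (i + 2) out
    else fixB_go lines isF isU pf pu (i + 1) (out ++ [lines.getD i ""])
  else out
termination_by lines.length - i
decreasing_by all_goals omega

def fix_overload_conflicts_alt (content : String) : String :=
  let lines := (PySem.Str.split? content "\n").getD []
  let isF := fixB_flags lines "arg1: float"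
  let isU := fixB_flags lines "arg0: TypeDesc | BASETYPE | str"
  PySem.Str.join "\n" (fixB_go lines isF isU (fixB_prefix isF) (fixB_prefix isU) 0 [])

-- ===== PRECONDITION & SPEC =====
def Spec_fix_overload_conflicts (content : String) (out : String) : Prop := out = fix_overload_conflicts_alt content
instance (content : String) (out : String) : Decidable (Spec_fix_overload_conflicts content out) := by unfold Spec_fix_overload_conflicts; infer_instance

-- ===== CLAIM (what is proved, stated in full; the proofs are below) =====
def Claim_equal_fix_overload_conflicts : Prop := ∀ (content : String), Dom_fix_overload_conflicts content → Spec_fix_overload_conflicts content (fix_overload_conflicts content)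

-- ===== LEMMAS AND PROOFS =====

-- proof-only reference predicate: A's removal condition, window scans spelled out
def remSpec (lines : List String) (i : Nat) : Bool :=
  if decide (i + 1 < lines.length) && PySem.Str.isIn "@overload" (lines.getD i "") then
    let nxt := lines.getD (i + 1) ""
    if (PySem.Str.isIn "arg1: int" nxt &&
        (PySem.Str.isIn "def attribute(" nxt || PySem.Str.isIn "def __init__(" nxt)) &&
       (List.range' (i - 4) (min lines.length (i + 6) - (i - 4))).any
          (fun j => decide (j ≠ i + 1) && PySem.Str.isIn "arg1: float" (lines.getD j "")) then
      true
    else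
      (PySem.Str.isIn "def __init__(self, arg0: BASETYPE, /)" nxt ||
       PySem.Str.isIn "def __init__(self, arg0: str, /)" nxt) &&
      (List.range' (i - 10) (min lines.length (i + 10) - (i - 10))).any
          (fun j => decide (j ≠ i + 1) && PySem.Str.isIn "arg0: TypeDesc | BASETYPE | str" (lines.getD j ""))
  else false

-- the lines both programs keep, from index i on
def keptP (lines : List String) (i : Nat) : List String :=
  if i < lines.length then
    if remSpec lines i then keptP lines (i + 2)
    else lines.getD i "" :: keptP lines (i + 1)
  else []
termination_by lines.length - i
decreasing_by all_goals omega

lemma remSpec_lt {lines : List String} {i : Nat} (h : remSpec lines i = true) :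
    i + 1 < lines.length := by
  unfold remSpec at h
  by_cases hg : (decide (i + 1 < lines.length) && PySem.Str.isIn "@overload" (lines.getD i "")) = true
  · exact of_decide_eq_true (Bool.and_elim_left hg)
  · rw [if_neg hg] at h; exact absurd h (by simp)

lemma bool_absorb (a b c : Bool) : (a && (b || (c && a))) = (a && (b || c)) := by
  revert a b c; decide

lemma fixA_step_skip {lines : List String} {i : Nat} (h : remSpec lines i = true)
    (rest : List Nat) (acc : List String) :
    fixA_go lines (i :: rest) acc false = fixA_go lines rest acc true := by
  unfold remSpec at h
  simp only [fixA_go, Bool.false_eq_true, if_false]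
  rw [bool_absorb]
  by_cases hG : (decide (i + 1 < lines.length) && PySem.Str.isIn "@overload" (lines.getD i "")) = true
  · rw [if_pos hG] at h ⊢
    by_cases h1 : (PySem.Str.isIn "arg1: int" (lines.getD (i+1) "") &&
        (PySem.Str.isIn "def attribute(" (lines.getD (i+1) "") ||
         PySem.Str.isIn "def __init__(" (lines.getD (i+1) "")) &&
        (List.range' (i - 4) (min lines.length (i + 6) - (i - 4))).any
          (fun j => decide (j ≠ i + 1) && PySem.Str.isIn "arg1: float" (lines.getD j ""))) = true
    · rw [if_pos h1]
    · rw [if_neg h1] at h ⊢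
      rw [if_pos h]
  · rw [if_neg hG] at h; exact absurd h (by simp)

lemma fixA_step_keep {lines : List String} {i : Nat} (h : remSpec lines i = false)
    (rest : List Nat) (acc : List String) :
    fixA_go lines (i :: rest) acc false = fixA_go lines rest (acc ++ [lines.getD i ""]) false := by
  unfold remSpec at h
  simp only [fixA_go, Bool.false_eq_true, if_false]
  rw [bool_absorb]
  by_cases hG : (decide (i + 1 < lines.length) && PySem.Str.isIn "@overload" (lines.getD i "")) = true
  · rw [if_pos hG] at h ⊢
    by_cases h1 : (PySem.Str.isIn "arg1: int" (lines.getD (i+1) "") &&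
        (PySem.Str.isIn "def attribute(" (lines.getD (i+1) "") ||
         PySem.Str.isIn "def __init__(" (lines.getD (i+1) "")) &&
        (List.range' (i - 4) (min lines.length (i + 6) - (i - 4))).any
          (fun j => decide (j ≠ i + 1) && PySem.Str.isIn "arg1: float" (lines.getD j ""))) = true
    · rw [if_pos h1] at h; cases h
    · rw [if_neg h1] at h ⊢
      rw [if_neg (by rw [Bool.not_eq_true]; exact h)]
  · rw [if_neg hG]

lemma A_eq_kept (lines : List String) :
    ∀ m i acc, lines.length ≤ i + m →
      fixA_go lines (List.range' i (lines.length - i)) acc false = acc ++ keptP lines i := by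
  intro m
  induction m with
  | zero =>
    intro i acc h
    have h0 : lines.length - i = 0 := by omega
    rw [h0, keptP, if_neg (by omega)]
    simp [fixA_go]
  | succ m ih =>
    intro i acc h
    by_cases hi : i < lines.length
    · rw [keptP, if_pos hi]
      by_cases hr : remSpec lines i = true
      · have h2 : i + 1 < lines.length := remSpec_lt hr
        obtain ⟨k, hk⟩ : ∃ k, lines.length - i = k + 2 := ⟨lines.length - i - 2, by omega⟩
        rw [if_pos hr, hk, List.range'_succ, List.range'_succ, fixA_step_skip hr]
        have hstep : fixA_go lines ((i + 1) :: List.range' (i + 1 + 1) k) acc true =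
            fixA_go lines (List.range' (i + 2) k) acc false := by
          simp [fixA_go]
        rw [hstep]
        have hk2 : k = lines.length - (i + 2) := by omega
        rw [hk2]
        exact ih (i + 2) acc (by omega)
      · rw [if_neg hr]
        obtain ⟨k, hk⟩ : ∃ k, lines.length - i = k + 1 := ⟨lines.length - i - 1, by omega⟩
        rw [hk, List.range'_succ, fixA_step_keep (Bool.not_eq_true _ ▸ hr)]
        have hk2 : k = lines.length - (i + 1) := by omega
        rw [hk2, ih (i + 1) (acc ++ [lines.getD i ""]) (by omega)]
        simp
    · have h0 : lines.length - i = 0 := by omega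
      rw [h0, keptP, if_neg hi]
      simp [fixA_go]

-- proof-only mirror of the prefix-sum list built from a running total
def psL : List Bool → Nat → List Nat
  | [], _ => []
  | b :: bs, t => (t + (if b then 1 else 0)) :: psL bs (t + (if b then 1 else 0))

lemma fixB_prefix_foldl (flags : List Bool) :
    ∀ (acc : List Nat) (t : Nat), acc ≠ [] → acc.getLast?.getD 0 = t →
      flags.foldl (fun acc b => acc ++ [(acc.getLast?.getD 0) + (if b then 1 else 0)]) acc
        = acc ++ psL flags t := by
  induction flags with
  | nil => intro acc t _ _; simp [psL]
  | cons b bs ih =>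
    intro acc t hne hlast
    simp only [List.foldl, psL]
    rw [hlast, ih (acc ++ [t + (if b then 1 else 0)]) (t + (if b then 1 else 0)) (by simp)
      (by simp)]
    simp

lemma fixB_prefix_eq (flags : List Bool) : fixB_prefix flags = 0 :: psL flags 0 := by
  unfold fixB_prefix
  rw [fixB_prefix_foldl flags [0] 0 (by simp) (by simp)]
  simp

lemma psL_getD (flags : List Bool) :
    ∀ t k, k ≤ flags.length →
      (t :: psL flags t).getD k 0 = t + (flags.take k).count true := by
  induction flags with
  | nil =>
    intro t k h
    have hk : k = 0 := by simp at h; omega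
    subst hk
    simp
  | cons b bs ih =>
    intro t k h
    cases k with
    | zero => simp
    | succ m =>
      have hm : m ≤ bs.length := by simpa using h
      have hih := ih (t + (if b then 1 else 0)) m hm
      simp only [List.getD_cons_succ, psL, List.take_succ_cons, List.count_cons] at hih ⊢
      rw [hih]
      by_cases hb : b = true <;> simp [hb] <;> omega

-- bridge: a slice's count of true flags equals a countP over the index range
lemma count_drop_take (flags : List Bool) :
    ∀ len lo, lo + len ≤ flags.length →
      ((flags.drop lo).take len).count true
        = (List.range' lo len).countP (fun j => flags.getD j false) := by
  intro len
  induction len with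
  | zero => intro lo _; simp
  | succ m ih =>
    intro lo h
    have hlo : lo < flags.length := by omega
    rw [List.drop_eq_getElem_cons hlo, List.take_succ_cons, List.count_cons,
        List.range'_succ, List.countP_cons, ih (lo + 1) (by omega)]
    have hg : flags.getD lo false = flags[lo] := List.getD_eq_getElem flags false hlo
    have hg2 : flags[lo]?.getD false = flags[lo] := by
      rw [List.getElem?_eq_getElem hlo]
      rfl
    by_cases hb : flags[lo] = true <;> simp [hb, hg2]

lemma count_take_sub (flags : List Bool) (lo hi : Nat) (h1 : lo ≤ hi) (h2 : hi ≤ flags.length) :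
    (flags.take hi).count true
      = (flags.take lo).count true
        + (List.range' lo (hi - lo)).countP (fun j => flags.getD j false) := by
  have hsplit : flags.take hi = flags.take lo ++ (flags.drop lo).take (hi - lo) := by
    rw [← List.take_add]
    congr 1
    omega
  rw [hsplit, List.count_append, count_drop_take flags (hi - lo) lo (by omega)]

lemma range'_split (lo m len : Nat) (h1 : lo ≤ m) (h2 : m < lo + len) :
    List.range' lo len
      = List.range' lo (m - lo) ++ m :: List.range' (m + 1) (lo + len - m - 1) := by
  conv_lhs => rw [show len = (m - lo) + ((lo + len - m - 1) + 1) from by omega,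
    ← List.range'_append_1]
  rw [show lo + (m - lo) = m from by omega, List.range'_succ]

lemma anyCongrMem {A : Type} (l : List A) (p q : A → Bool)
    (h : ∀ a ∈ l, p a = q a) : l.any p = l.any q := by
  induction l with
  | nil => rfl
  | cons a as ihl =>
    simp only [List.any_cons]
    rw [h a (List.mem_cons_self ..), ihl (fun b hb => h b (List.mem_cons_of_mem a hb))]

-- the central window lemma: positive prefix-sum difference minus the flag of m
-- iff some index ≠ m in [lo, hi) has the flag
lemma window_iff (flags : List Bool) (lo m hi : Nat)
    (h1 : lo ≤ m) (h2 : m < hi) (h3 : hi ≤ flags.length) :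
    (0 < (flags.take hi).count true - (flags.take lo).count true -
          (if flags.getD m false then 1 else 0))
      ↔ (List.range' lo (hi - lo)).any
          (fun j => decide (j ≠ m) && flags.getD j false) = true := by
  rw [count_take_sub flags lo hi (by omega) h3, Nat.add_sub_cancel_left]
  rw [range'_split lo m (hi - lo) h1 (by omega)]
  rw [List.countP_append, List.countP_cons, List.any_append, List.any_cons]
  have hm : (decide (m ≠ m) && flags.getD m false) = false := by simp
  rw [hm]
  have e1 : ∀ l : List Nat, (∀ j ∈ l, j ≠ m) →
      l.any (fun j => decide (j ≠ m) && flags.getD j false) = l.any (fun j => flags.getD j false) := by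
    intro l hl
    induction l with
    | nil => rfl
    | cons a as ihl =>
      simp only [List.any_cons]
      rw [ihl (fun j hj => hl j (List.mem_cons_of_mem a hj))]
      have : (a ≠ m) := hl a (List.mem_cons_self ..)
      simp [this]
  rw [e1 _ (fun j hj => by have := List.mem_range'_1.mp hj; omega),
      e1 _ (fun j hj => by have := List.mem_range'_1.mp hj; omega)]
  have harith : ∀ c1 c2 f : Nat, (0 < c1 + (c2 + f) - f ↔ 0 < c1 ∨ 0 < c2) := by
    intro c1 c2 f
    omega
  rw [harith]
  simp only [Bool.or_eq_true, List.any_eq_true, List.countP_pos_iff, Bool.false_eq_true, false_or]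

lemma flags_getD (lines : List String) (pat : String) (j : Nat) (hj : j < lines.length) :
    (fixB_flags lines pat).getD j false = PySem.Str.isIn pat (lines.getD j "") := by
  unfold fixB_flags
  rw [List.getD_eq_getElem _ _ (by simpa using hj), List.getD_eq_getElem _ _ hj]
  simp

lemma flags_len (lines : List String) (pat : String) :
    (fixB_flags lines pat).length = lines.length := by
  simp [fixB_flags]

lemma prefix_getD (flags : List Bool) (k : Nat) (hk : k ≤ flags.length) :
    (fixB_prefix flags).getD k 0 = (flags.take k).count true := by
  rw [fixB_prefix_eq]
  have := psL_getD flags 0 k hk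
  simpa using this

-- removable(i) (B) agrees with A's window-scan condition
lemma removableB_eq (lines : List String) (i : Nat) :
    removableB lines (fixB_flags lines "arg1: float")
      (fixB_flags lines "arg0: TypeDesc | BASETYPE | str")
      (fixB_prefix (fixB_flags lines "arg1: float"))
      (fixB_prefix (fixB_flags lines "arg0: TypeDesc | BASETYPE | str")) i
      = remSpec lines i := by
  unfold removableB remSpec
  by_cases hG : (decide (i + 1 < lines.length) && PySem.Str.isIn "@overload" (lines.getD i "")) = true
  · rw [if_pos hG, if_pos hG]
    have hi1 : i + 1 < lines.length := of_decide_eq_true (Bool.and_elim_left hG)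
    have key : ∀ pat : String,
        ∀ lo hi : Nat, lo ≤ i + 1 → i + 1 < hi → hi ≤ lines.length →
        decide (0 < (fixB_prefix (fixB_flags lines pat)).getD hi 0
                    - (fixB_prefix (fixB_flags lines pat)).getD lo 0
                    - (if (fixB_flags lines pat).getD (i + 1) false then 1 else 0))
          = (List.range' lo (hi - lo)).any
              (fun j => decide (j ≠ i + 1) && PySem.Str.isIn pat (lines.getD j "")) := by
      intro pat lo hi hlo hhi hle
      have hlen := flags_len lines pat
      rw [prefix_getD _ hi (by omega), prefix_getD _ lo (by omega)]
      have hw := window_iff (fixB_flags lines pat) lo (i + 1) hi hlo hhi (by omega)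
      have he : (List.range' lo (hi - lo)).any
            (fun j => decide (j ≠ i + 1) && (fixB_flags lines pat).getD j false)
          = (List.range' lo (hi - lo)).any
            (fun j => decide (j ≠ i + 1) && PySem.Str.isIn pat (lines.getD j "")) := by
        apply anyCongrMem
        intro j hj
        have hjr := List.mem_range'_1.mp hj
        rw [flags_getD lines pat j (by omega)]
      rw [← he]
      by_cases htest : (0 < ((fixB_flags lines pat).take hi).count true
          - ((fixB_flags lines pat).take lo).count true
          - (if (fixB_flags lines pat).getD (i + 1) false then 1 else 0))
      · rw [decide_eq_true htest, Eq.comm, hw.mp htest]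
      · rw [decide_eq_false htest, Eq.comm]
        rw [Bool.eq_false_iff]
        intro hc
        exact htest (hw.mpr hc)
    rw [key "arg1: float" (i - 4) (min lines.length (i + 6)) (by omega) (by omega) (by omega),
        key "arg0: TypeDesc | BASETYPE | str" (i - 10) (min lines.length (i + 10))
          (by omega) (by omega) (by omega)]
  · rw [if_neg hG, if_neg hG]

lemma B_eq_kept (lines : List String) :
    ∀ m i out, lines.length ≤ i + m →
      fixB_go lines (fixB_flags lines "arg1: float")
        (fixB_flags lines "arg0: TypeDesc | BASETYPE | str")
        (fixB_prefix (fixB_flags lines "arg1: float"))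
        (fixB_prefix (fixB_flags lines "arg0: TypeDesc | BASETYPE | str")) i out
        = out ++ keptP lines i := by
  intro m
  induction m with
  | zero =>
    intro i out h
    rw [fixB_go, if_neg (by omega), keptP, if_neg (by omega)]
    simp
  | succ m ih =>
    intro i out h
    by_cases hi : i < lines.length
    · rw [fixB_go, if_pos hi, keptP, if_pos hi, removableB_eq]
      by_cases hr : remSpec lines i = true
      · rw [if_pos hr, if_pos hr]
        exact ih (i + 2) out (by omega)
      · rw [if_neg hr, if_neg hr, ih (i + 1) (out ++ [lines.getD i ""]) (by omega)]
        simp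
    · rw [fixB_go, if_neg hi, keptP, if_neg hi]
      simp

-- ===== VERDICT (by name: the statement is the Claim_ definition above) =====
theorem fix_overload_conflicts_spec : Claim_equal_fix_overload_conflicts := by
  intro content _dom
  unfold Spec_fix_overload_conflicts fix_overload_conflicts fix_overload_conflicts_alt
  set lines := (PySem.Str.split? content "\n").getD [] with hlines
  have hA : fixA_go lines (List.range lines.length) [] false = keptP lines 0 := by
    have := A_eq_kept lines lines.length 0 [] (by omega)
    simpa [List.range_eq_range'] using this
  have hB := B_eq_kept lines lines.length 0 [] (by omega)
  simp only [hA, hB, List.nil_append]
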